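-- pv_equiv track=rewrite | github.com/BbangYi/ChungMaru | backend/api/site_intel_store.py | _domain_candidates
-- ===== SOURCE A (Python) =====
-- def _normalize_domain(value: str) -> str:
--     domain = (value or "").strip().lower()
--     if domain.startswith("www."):
--         domain = domain[4:]
--     return domain
--
-- def _domain_candidates(domain: str) -> list[str]:
--     normalized = _normalize_domain(domain)
--     if not normalized:
--         return []
--     parts = normalized.split(".")
--     candidates = []
--     for idx in range(len(parts) - 1):
--         candidate = ".".join(parts[idx:])
--         if candidate and candidate not in candidates:
--             candidates.append(candidate)
--     return candidates
-- ===== SOURCE B (Python) =====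
-- def _normalize_domain(value: str) -> str:
--     domain = (value or "").strip().lower()
--     if domain.startswith("www."):
--         domain = domain[4:]
--     return domain
--
-- def _domain_candidates(domain: str) -> list[str]:
--     d = _normalize_domain(domain)
--     if not d:
--         return []
--     parts = d.split(".")
--     # Build suffixes right-to-left with a running accumulator, then reverse
--     # to A's longest-first order.  Each suffix is strictly longer than the
--     # next, so they are distinct and non-empty: no dedup pass is needed.
--     suffix = parts[-1]
--     out = []
--     for part in reversed(parts[:-1]):
--         suffix = part + "." + suffix
--         out.append(suffix)
--     out.reverse()
--     return out
-- ===== Notes on version B (the rewrite author's own statement) =====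
-- stated objective: faster
-- what changed: Replaces the per-index slice+join and linear membership dedup with a single right-to-left pass maintaining a running suffix accumulator (then one final reverse); the dedup and truthiness checks disappear because successive suffixes are strictly longer, hence distinct and non-empty.
import Mathlib
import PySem

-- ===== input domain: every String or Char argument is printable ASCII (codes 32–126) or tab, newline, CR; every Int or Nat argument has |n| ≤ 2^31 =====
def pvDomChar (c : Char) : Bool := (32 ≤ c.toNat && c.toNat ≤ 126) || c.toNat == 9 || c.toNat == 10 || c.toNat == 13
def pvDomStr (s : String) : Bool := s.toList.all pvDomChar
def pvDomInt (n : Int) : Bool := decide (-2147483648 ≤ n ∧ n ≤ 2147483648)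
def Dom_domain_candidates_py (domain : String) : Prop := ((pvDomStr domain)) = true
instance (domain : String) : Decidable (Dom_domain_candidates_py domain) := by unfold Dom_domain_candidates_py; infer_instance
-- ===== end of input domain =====

-- B replaces A's per-index slice+join with membership dedup by one right-to-left pass
-- keeping a running suffix accumulator, reversed at the end (objective: faster).

-- ===== PORT A =====
-- `(value or "")` on a str is `value` if non-empty else `""`: ported as the if below (exact).
def normalize_domain_py (value : String) : String :=
  let domain := PySem.Str.lower (PySem.Str.strip (if value = "" then "" else value))
  if PySem.Str.startswith domain "www." then PySem.Str.slice domain (some 4) none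
  else domain

-- `normalized.split(".")`: the separator "." is non-empty, so split? is always some
-- and the getD default is never used.
def domain_candidates_py (domain : String) : List String :=
  let normalized := normalize_domain_py domain
  if normalized = "" then []
  else
    let parts := (PySem.Str.split? normalized ".").getD []
    (PySem.List.pyRange 0 ((parts.length : Int) - 1) 1).foldl
      (fun candidates idx =>
        let candidate := PySem.Str.join "." (PySem.List.slice parts (some idx) none)
        if candidate ≠ "" ∧ candidate ∉ candidates then candidates ++ [candidate]
        else candidates) []

-- ===== PORT B =====
-- B calls the same module helper `_normalize_domain`; `part + "." + suffix` is
-- ported as PySem.Str.join "." [part, suffix] (exact: the same string).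
def domain_candidates_py_alt (domain : String) : List String :=
  let d := normalize_domain_py domain
  if d = "" then []
  else
    let parts := (PySem.Str.split? d ".").getD []
    -- parts[-1]: str.split always returns a non-empty list, so the none branch
    -- (where Python would raise IndexError) is unreachable.
    match PySem.List.pyGet? parts (-1) with
    | none => []
    | some last =>
      ((PySem.List.slice parts none (some (-1))).reverse.foldl
        (fun (st : String × List String) part =>
          let s := PySem.Str.join "." [part, st.1]
          (s, st.2 ++ [s])) (last, [])).2.reverse

-- ===== PRECONDITION & SPEC =====
def Spec_domain_candidates_py (domain : String) (out : List String) : Prop := out = domain_candidates_py_alt domain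
instance (domain : String) (out : List String) : Decidable (Spec_domain_candidates_py domain out) := by unfold Spec_domain_candidates_py; infer_instance

-- ===== CLAIM (what is proved, stated in full; the proofs are below) =====
def Claim_equal_domain_candidates_py : Prop := ∀ (domain : String), Dom_domain_candidates_py domain → Spec_domain_candidates_py domain (domain_candidates_py domain)

-- ===== LEMMAS AND PROOFS =====

/-- The suffix candidate starting at label `i`: `".".join(parts[i:])`. -/
def pvJ (parts : List String) (i : Nat) : String :=
  PySem.Str.join "." (parts.drop i)

theorem pvJ_toList (parts : List String) (i : Nat) :
    (pvJ parts i).toList = PySem.Chars.join ['.'] ((parts.drop i).map String.toList) := by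
  simp only [pvJ, PySem.Str.toList_join]
  rfl

theorem pv_len_step (parts : List String) (i : Nat) (h : i + 2 ≤ parts.length) :
    (pvJ parts (i+1)).toList.length + 1 ≤ (pvJ parts i).toList.length := by
  have hi : i < parts.length := by omega
  have hdrop : parts.drop i = parts[i] :: parts.drop (i+1) := List.drop_eq_getElem_cons hi
  obtain ⟨b, r, hbr⟩ : ∃ b r, parts.drop (i+1) = b :: r := by
    cases h' : parts.drop (i+1) with
    | nil =>
      have hlen : (parts.drop (i+1)).length = parts.length - (i+1) := List.length_drop ..
      rw [h'] at hlen
      simp only [List.length_nil] at hlen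
      omega
    | cons b r => exact ⟨b, r, rfl⟩
  rw [pvJ_toList, pvJ_toList, hdrop, hbr]
  simp only [List.map_cons]
  rw [PySem.Chars.join_cons_cons]
  simp only [List.length_append, List.length_cons, List.length_nil]
  omega

theorem pv_len_lt (parts : List String) :
    ∀ (d i : Nat), i + d + 2 ≤ parts.length →
      (pvJ parts (i + d + 1)).toList.length < (pvJ parts i).toList.length := by
  intro d
  induction d with
  | zero =>
    intro i h
    have h1 := pv_len_step parts i (by omega)
    have e : i + 0 + 1 = i + 1 := rfl
    rw [e]
    omega
  | succ d ih =>
    intro i h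
    have h1 := pv_len_step parts i (by omega)
    have h2 := ih (i+1) (by omega)
    have he : i + (d + 1) + 1 = (i + 1) + d + 1 := by omega
    rw [he]
    omega

theorem pv_len_lt' (parts : List String) (i j : Nat) (hij : i < j)
    (hj : j + 1 ≤ parts.length) :
    (pvJ parts j).toList.length < (pvJ parts i).toList.length := by
  have he : j = i + (j - i - 1) + 1 := by omega
  rw [he]
  exact pv_len_lt parts (j - i - 1) i (by omega)

theorem pv_ne_empty (parts : List String) (i : Nat) (h : i + 2 ≤ parts.length) :
    pvJ parts i ≠ "" := by
  intro hcon
  have := pv_len_step parts i h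
  rw [hcon] at this
  simp at this

/-- A's fold over `range(len(parts)-1)` produces exactly the suffix joins in order:
the dedup and non-emptiness tests always pass. -/
theorem pv_A_loop (parts : List String) :
    ∀ (m k : Nat) (acc : List String), k + m + 1 = parts.length →
      (∀ s ∈ acc, ∀ i, k ≤ i → i + 2 ≤ parts.length →
          (pvJ parts i).toList.length < s.toList.length) →
      (PySem.List.pyRange (k : Int) ((parts.length : Int) - 1) 1).foldl
        (fun candidates idx =>
          let candidate := PySem.Str.join "." (PySem.List.slice parts (some idx) none)
          if candidate ≠ "" ∧ candidate ∉ candidates then candidates ++ [candidate]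
          else candidates) acc
        = acc ++ (List.range' k m).map (pvJ parts) := by
  intro m
  induction m with
  | zero =>
    intro k acc hk _
    have : ((parts.length : Int) - 1) = (k : Int) := by omega
    rw [this, PySem.List.pyRange_one_eq_nil (by omega)]
    simp
  | succ m ih =>
    intro k acc hk hacc
    have hklt : (k : Int) < (parts.length : Int) - 1 := by omega
    rw [PySem.List.pyRange_one_cons hklt, List.foldl_cons]
    have hslice : PySem.List.slice parts (some (k : Int)) none = parts.drop k :=
      PySem.List.slice_from_natCast ..
    have hcand : PySem.Str.join "." (PySem.List.slice parts (some (k : Int)) none) = pvJ parts k := by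
      rw [hslice]; rfl
    simp only [hcand]
    have hk2 : k + 2 ≤ parts.length := by omega
    have hne : pvJ parts k ≠ "" := pv_ne_empty parts k hk2
    have hnm : pvJ parts k ∉ acc := by
      intro hmem
      have := hacc _ hmem k (le_refl k) hk2
      omega
    rw [if_pos ⟨hne, hnm⟩]
    have hcast : (k : Int) + 1 = ((k + 1 : Nat) : Int) := by push_cast; ring
    rw [hcast, ih (k+1) (acc ++ [pvJ parts k]) (by omega) ?_]
    · rw [List.range'_succ, List.map_cons]
      simp
    · intro s hs i hi hi2
      rcases List.mem_append.mp hs with h' | h'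
      · exact hacc s h' i (by omega) hi2
      · have hs' : s = pvJ parts k := by simpa using h'
        rw [hs']
        exact pv_len_lt' parts k i (by omega) (by omega)

theorem pv_join_singleton (a : String) : PySem.Str.join "." [a] = a := by
  apply String.toList_inj.mp
  rw [PySem.Str.toList_join]
  exact PySem.Chars.join_singleton ..

theorem pv_join_cons (p : String) (tp : List String) (h : tp ≠ []) :
    PySem.Str.join "." [p, PySem.Str.join "." tp] = PySem.Str.join "." (p :: tp) := by
  cases tp with
  | nil => exact absurd rfl h
  | cons b r =>
    apply String.toList_inj.mp
    simp only [PySem.Str.toList_join, List.map_cons, List.map_nil,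
      PySem.Chars.join_cons_cons, PySem.Chars.join_singleton]

/-- B's running-accumulator fold appends the suffix joins shortest-first. -/
theorem pv_B_loop :
    ∀ (front tp : List String) (out : List String), tp ≠ [] →
      (front.foldl
          (fun (st : String × List String) part =>
            let s := PySem.Str.join "." [part, st.1]
            (s, st.2 ++ [s])) (PySem.Str.join "." tp, out)).2
        = out ++ ((List.range front.length).map
            (fun i => PySem.Str.join "." ((front.reverse ++ tp).drop i))).reverse := by
  intro front
  induction front with
  | nil => intro tp out _; simp
  | cons p f ih =>
    intro tp out htp
    rw [List.foldl_cons]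
    simp only
    rw [pv_join_cons p tp htp]
    rw [ih (p :: tp) (out ++ [PySem.Str.join "." (p :: tp)]) (by simp)]
    have hM : (p :: f).reverse ++ tp = f.reverse ++ (p :: tp) := by simp
    rw [hM]
    have hlen : (p :: f).length = f.length + 1 := rfl
    rw [hlen, List.range_succ, List.map_append, List.reverse_append]
    have hdrop : (f.reverse ++ (p :: tp)).drop f.length = p :: tp := by
      have he : f.length = f.reverse.length := by simp
      rw [he, List.drop_left]
    simp [hdrop]

/-- Core: for any `parts`, A's loop equals B's indexing, loop and final reverse. -/
theorem pv_core (parts : List String) :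
    (PySem.List.pyRange 0 ((parts.length : Int) - 1) 1).foldl
      (fun candidates idx =>
        let candidate := PySem.Str.join "." (PySem.List.slice parts (some idx) none)
        if candidate ≠ "" ∧ candidate ∉ candidates then candidates ++ [candidate]
        else candidates) []
    = (match PySem.List.pyGet? parts (-1) with
      | none => []
      | some last =>
        ((PySem.List.slice parts none (some (-1))).reverse.foldl
          (fun (st : String × List String) part =>
            let s := PySem.Str.join "." [part, st.1]
            (s, st.2 ++ [s])) (last, [])).2.reverse) := by
  cases hp : parts.reverse with
  | nil =>
    have : parts = [] := List.reverse_eq_nil_iff.mp hp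
    subst this
    rfl
  | cons l f =>
    have hparts : parts = f.reverse ++ [l] := by
      rw [← List.reverse_reverse parts, hp]; simp
    have hlen : parts.length = f.length + 1 := by rw [hparts]; simp
    have hA := pv_A_loop parts (parts.length - 1) 0 [] (by omega) (by intro s hs; simp at hs)
    rw [show ((0 : Nat) : Int) = (0 : Int) from rfl] at hA
    have hget : PySem.List.pyGet? parts (-1) = some l := by
      rw [hparts]
      simp [PySem.List.pyGet?, PySem.List.pyIdx?]
    have hstep : (PySem.List.slice parts none (some (-1))).reverse = f := by
      rw [PySem.List.slice_to_neg_one, hparts, List.dropLast_concat, List.reverse_reverse]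
    have hB := pv_B_loop f [l] [] (by simp)
    rw [pv_join_singleton, ← hparts] at hB
    have hmid : List.map (pvJ parts) (List.range' 0 (parts.length - 1))
        = ((PySem.List.slice parts none (some (-1))).reverse.foldl
            (fun (st : String × List String) part =>
              let s := PySem.Str.join "." [part, st.1]
              (s, st.2 ++ [s])) (l, [])).2.reverse := by
      rw [hstep, hB]
      simp only [List.nil_append, List.reverse_reverse]
      rw [← List.range_eq_range' (n := parts.length - 1)]
      have he : parts.length - 1 = f.length := by omega
      rw [he]
      rfl
    rw [hA, hget]
    exact (List.nil_append _).trans hmid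

-- ===== VERDICT (by name: the statement is the Claim_ definition above) =====
theorem domain_candidates_py_spec : Claim_equal_domain_candidates_py := by
  intro domain _
  show domain_candidates_py domain = domain_candidates_py_alt domain
  unfold domain_candidates_py domain_candidates_py_alt
  by_cases h : normalize_domain_py domain = ""
  · rw [if_pos h, if_pos h]
  · rw [if_neg h, if_neg h]
    simp only []
    generalize (PySem.Str.split? (normalize_domain_py domain) ".").getD ([] : List String) = parts
    exact pv_core parts
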